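-- pv_equiv track=rewrite | github.com/BIT-Orange/HiRoute | scripts/build_dataset/audit_controller_manifest_coverage.py | _sequential_zero_reason
-- ===== SOURCE A (Python) =====
-- def _canonical_zone_token(zone_id: str) -> str:
--     marker = zone_id.rfind("-zone-")
--     if marker == -1:
--         return zone_id
--     return zone_id[marker + 1 :]
--
-- def _matches_zone_constraint(object_zone_id: str, constraint: str) -> bool:
--     if not constraint:
--         return True
--     canonical = _canonical_zone_token(object_zone_id)
--     return any(
--         token and (token == object_zone_id or token == canonical)
--         for token in constraint.split(";")
--     )
--
-- def _sequential_zero_reason(candidate_rows: list[dict[str, str]], query_row: dict[str, str]) -> str: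
--     remaining = list(candidate_rows)
--     zone_constraint = query_row.get("zone_constraint", "")
--     if zone_constraint:
--         zone_rows = [
--             row for row in remaining if _matches_zone_constraint(row.get("zone_id", ""), zone_constraint)
--         ]
--         if not zone_rows:
--             return "zone_mismatch"
--         remaining = zone_rows
--     zone_type_constraint = query_row.get("zone_type_constraint", "")
--     if zone_type_constraint:
--         zone_type_rows = [row for row in remaining if row.get("zone_type", "") == zone_type_constraint]
--         if not zone_type_rows:
--             return "zone_type_mismatch"
--         remaining = zone_type_rows
--     service_constraint = query_row.get("service_constraint", "")
--     if service_constraint: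
--         service_rows = [row for row in remaining if row.get("service_class", "") == service_constraint]
--         if not service_rows:
--             return "service_mismatch"
--         remaining = service_rows
--     freshness_constraint = query_row.get("freshness_constraint", "")
--     if freshness_constraint:
--         freshness_rows = [
--             row for row in remaining if row.get("freshness_class", "") == freshness_constraint
--         ]
--         if not freshness_rows:
--             return "freshness_mismatch"
--     return ""
-- ===== SOURCE B (Python) =====
-- def _canonical_zone_token(zone_id):
--     marker = zone_id.rfind("-zone-")
--     return zone_id if marker == -1 else zone_id[marker + 1:]
--
-- def _matches_zone_constraint(object_zone_id, constraint):
--     if not constraint: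
--         return True
--     canonical = _canonical_zone_token(object_zone_id)
--     return any(token and (token == object_zone_id or token == canonical)
--                for token in constraint.split(";"))
--
-- _SPECS = (
--     ("zone_constraint", "zone_mismatch", None),
--     ("zone_type_constraint", "zone_type_mismatch", "zone_type"),
--     ("service_constraint", "service_mismatch", "service_class"),
--     ("freshness_constraint", "freshness_mismatch", "freshness_class"),
-- )
--
-- def _row_passes(row, field, value):
--     if field is None:
--         return _matches_zone_constraint(row.get("zone_id", ""), value)
--     return row.get(field, "") == value
--
-- def _pass_streak(row, active):
--     # how many leading active constraints this row satisfies
--     k = 0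
--     for _reason, field, value in active:
--         if not _row_passes(row, field, value):
--             break
--         k += 1
--     return k
--
-- def _sequential_zero_reason(candidate_rows, query_row):
--     # Transposed algorithm: instead of narrowing the candidate list constraint by
--     # constraint, score each row once by its pass streak over the active constraints;
--     # the first constraint eliminating everyone is the one right after the best streak.
--     active = [(reason, field, query_row.get(key, ""))
--               for key, reason, field in _SPECS if query_row.get(key, "")]
--     best = 0
--     for row in candidate_rows:
--         best = max(best, _pass_streak(row, active))
--     if best == len(active):
--         return ""
--     return active[best][0]
-- ===== Notes on version B (the rewrite author's own statement) =====
-- stated objective: alternative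
-- what changed: Replaces A's sequential narrowing of the candidate list (filter per constraint, early return when it empties) with a transposed single pass over rows: each row is scored once by how many leading active constraints it passes, and the reason right after the maximal streak (or '' if all pass) is returned.
import Mathlib
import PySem

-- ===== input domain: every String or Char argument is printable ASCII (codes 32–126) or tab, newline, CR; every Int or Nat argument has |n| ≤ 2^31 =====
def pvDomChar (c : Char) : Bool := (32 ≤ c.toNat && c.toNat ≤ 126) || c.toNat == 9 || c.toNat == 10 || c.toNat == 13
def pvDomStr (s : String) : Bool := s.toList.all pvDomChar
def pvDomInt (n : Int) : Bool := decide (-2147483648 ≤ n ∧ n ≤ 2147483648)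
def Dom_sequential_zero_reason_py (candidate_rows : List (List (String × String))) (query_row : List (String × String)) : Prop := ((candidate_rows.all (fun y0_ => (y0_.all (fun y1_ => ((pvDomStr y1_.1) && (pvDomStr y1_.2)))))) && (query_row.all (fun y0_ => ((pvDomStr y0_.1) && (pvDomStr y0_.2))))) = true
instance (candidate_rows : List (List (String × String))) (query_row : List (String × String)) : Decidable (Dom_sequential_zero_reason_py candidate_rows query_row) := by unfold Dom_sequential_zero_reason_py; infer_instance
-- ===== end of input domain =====

-- B transposes A's algorithm: instead of narrowing the candidate list constraint by
-- constraint, it scores each row once by its pass streak over the active constraints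
-- and returns the reason right after the best streak ('alternative' objective).

-- ===== PORT A =====

-- row.get(k, "") on a dict (association list, first match)
def rowGetA (row : List (String × String)) (k : String) : String :=
  (List.lookup k row).getD ""

-- _canonical_zone_token
def canonicalZoneTokenA (zone_id : String) : String :=
  let marker := PySem.Str.rfind zone_id "-zone-"
  if marker = -1 then zone_id
  else PySem.Str.slice zone_id (some (marker + 1)) none

-- _matches_zone_constraint
def matchesZoneConstraintA (object_zone_id : String) (constraint : String) : Bool :=
  if constraint = "" then true
  else
    let canonical := canonicalZoneTokenA object_zone_id
    ((PySem.Str.split? constraint ";").getD []).any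
      (fun token => token ≠ "" && (token == object_zone_id || token == canonical))

-- the block 'freshness_constraint = …; if freshness_constraint: …; return ""'
-- (each early 'return' of the straight-line Python is a continuation helper)
def seqA_freshness (query_row : List (String × String)) (remaining : List (List (String × String))) : String :=
  let freshness_constraint := rowGetA query_row "freshness_constraint"
  if freshness_constraint ≠ "" then
    let freshness_rows := remaining.filter
      (fun row => rowGetA row "freshness_class" == freshness_constraint)
    if freshness_rows = [] then "freshness_mismatch" else ""
  else ""

-- the block 'service_constraint = …; if service_constraint: …'
def seqA_service (query_row : List (String × String)) (remaining : List (List (String × String))) : String :=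
  let service_constraint := rowGetA query_row "service_constraint"
  if service_constraint ≠ "" then
    let service_rows := remaining.filter
      (fun row => rowGetA row "service_class" == service_constraint)
    if service_rows = [] then "service_mismatch"
    else seqA_freshness query_row service_rows
  else seqA_freshness query_row remaining

-- the block 'zone_type_constraint = …; if zone_type_constraint: …'
def seqA_zone_type (query_row : List (String × String)) (remaining : List (List (String × String))) : String :=
  let zone_type_constraint := rowGetA query_row "zone_type_constraint"
  if zone_type_constraint ≠ "" then
    let zone_type_rows := remaining.filter
      (fun row => rowGetA row "zone_type" == zone_type_constraint)
    if zone_type_rows = [] then "zone_type_mismatch"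
    else seqA_service query_row zone_type_rows
  else seqA_service query_row remaining

def sequential_zero_reason_py (candidate_rows : List (List (String × String))) (query_row : List (String × String)) : String :=
  let remaining := candidate_rows
  let zone_constraint := rowGetA query_row "zone_constraint"
  if zone_constraint ≠ "" then
    let zone_rows := remaining.filter
      (fun row => matchesZoneConstraintA (rowGetA row "zone_id") zone_constraint)
    if zone_rows = [] then "zone_mismatch"
    else seqA_zone_type query_row zone_rows
  else seqA_zone_type query_row remaining

-- ===== PORT B =====

-- row.get(k, "") (B's spelling: find? + map)
def rowGetB (row : List (String × String)) (k : String) : String :=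
  ((row.find? (fun p => p.1 == k)).map (·.2)).getD ""

-- _canonical_zone_token (B)
def canonicalZoneTokenB (zone_id : String) : String :=
  let marker := PySem.Str.rfind zone_id "-zone-"
  if marker = -1 then zone_id
  else PySem.Str.slice zone_id (some (marker + 1)) none

-- _matches_zone_constraint (B)
def matchesZoneConstraintB (object_zone_id : String) (constraint : String) : Bool :=
  if constraint = "" then true
  else
    let canonical := canonicalZoneTokenB object_zone_id
    ((PySem.Str.split? constraint ";").getD []).any
      (fun token => token ≠ "" && (token == object_zone_id || token == canonical))

-- _SPECS: (query key, reason, row field; None = use the zone predicate)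
def specsB : List (String × String × Option String) :=
  [ ("zone_constraint", "zone_mismatch", none),
    ("zone_type_constraint", "zone_type_mismatch", some "zone_type"),
    ("service_constraint", "service_mismatch", some "service_class"),
    ("freshness_constraint", "freshness_mismatch", some "freshness_class") ]

-- _row_passes
def rowPassesB (row : List (String × String)) (field : Option String) (value : String) : Bool :=
  match field with
  | none => matchesZoneConstraintB (rowGetB row "zone_id") value
  | some f => rowGetB row f == value

-- _pass_streak: the for-loop with break, as structural recursion over active
def passStreakB (row : List (String × String)) : List (String × Option String × String) → Nat
  | [] => 0
  | (_reason, field, value) :: rest =>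
    if rowPassesB row field value then passStreakB row rest + 1 else 0

-- the 'active' comprehension
def buildActiveB (query_row : List (String × String)) : List (String × Option String × String) :=
  specsB.filterMap (fun s =>
    let v := rowGetB query_row s.1
    if v = "" then none else some (s.2.1, s.2.2, v))

def sequential_zero_reason_py_alt (candidate_rows : List (List (String × String))) (query_row : List (String × String)) : String :=
  let active := buildActiveB query_row
  let best := candidate_rows.foldl (fun b row => max b (passStreakB row active)) 0
  if best = active.length then ""
  else (((active[best]?).map (·.1)).getD "")   -- active[best][0]; best < len active here, so Python never raises

-- ===== PRECONDITION & SPEC =====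
def Spec_sequential_zero_reason_py (candidate_rows : List (List (String × String))) (query_row : List (String × String)) (out : String) : Prop := out = sequential_zero_reason_py_alt candidate_rows query_row
instance (candidate_rows : List (List (String × String))) (query_row : List (String × String)) (out : String) : Decidable (Spec_sequential_zero_reason_py candidate_rows query_row out) := by unfold Spec_sequential_zero_reason_py; infer_instance

-- ===== CLAIM =====
def Claim_equal_sequential_zero_reason_py : Prop := ∀ (candidate_rows : List (List (String × String))) (query_row : List (String × String)), Dom_sequential_zero_reason_py candidate_rows query_row → Spec_sequential_zero_reason_py candidate_rows query_row (sequential_zero_reason_py candidate_rows query_row)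

-- ===== LEMMAS AND PROOFS =====

-- B's whole computation, generically in the active-constraint list
def runB (cs : List (String × Option String × String)) (L : List (List (String × String))) : String :=
  let best := L.foldl (fun b row => max b (passStreakB row cs)) 0
  if best = cs.length then "" else (((cs[best]?).map (·.1)).getD "")

theorem alt_eq_runB (candidate_rows : List (List (String × String))) (query_row : List (String × String)) :
    sequential_zero_reason_py_alt candidate_rows query_row
      = runB (buildActiveB query_row) candidate_rows := rfl

def supOf (f : List (String × String) → Nat) (L : List (List (String × String))) : Nat :=
  L.foldr (fun x b => max (f x) b) 0

theorem foldl_max_eq (f : List (String × String) → Nat) (L : List (List (String × String))) (a : Nat) :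
    L.foldl (fun b x => max b (f x)) a = max a (supOf f L) := by
  induction L generalizing a with
  | nil => simp [supOf]
  | cons x xs ih =>
    simp only [List.foldl_cons, ih, supOf, List.foldr_cons]
    omega

theorem sup_zero (f : List (String × String) → Nat) (L : List (List (String × String)))
    (h : ∀ x ∈ L, f x = 0) : supOf f L = 0 := by
  induction L with
  | nil => rfl
  | cons x xs ih =>
    simp [supOf, List.foldr] at *
    exact ⟨h.1, ih h.2⟩

theorem sup_shift (p : List (String × String) → Bool) (g : List (String × String) → Nat)
    (L : List (List (String × String))) (h : L.filter p ≠ []) :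
    supOf (fun x => if p x then g x + 1 else 0) L = supOf g (L.filter p) + 1 := by
  induction L with
  | nil => simp at h
  | cons x xs ih =>
    by_cases hp : p x
    · by_cases hxs : xs.filter p = []
      · have hz : supOf (fun x => if p x then g x + 1 else 0) xs = 0 := by
          apply sup_zero
          intro y hy
          have : ¬ p y = true := by
            intro hpy
            exact (List.ne_nil_of_mem (List.mem_filter.mpr ⟨hy, hpy⟩)) hxs
          simp [this]
        simp [supOf, List.foldr, hp, hxs] at *
        omega
      · have := ih hxs
        simp [supOf, List.foldr, hp] at *
        omega
    · have hxs : xs.filter p ≠ [] := by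
        simpa [List.filter_cons, hp] using h
      have := ih hxs
      simp [supOf, List.foldr, hp] at *
      omega

theorem runB_cons (e : String × Option String × String) (rest : List (String × Option String × String))
    (L : List (List (String × String))) :
    runB (e :: rest) L
      = (if L.filter (fun row => rowPassesB row e.2.1 e.2.2) = []
         then e.1 else runB rest (L.filter (fun row => rowPassesB row e.2.1 e.2.2))) := by
  obtain ⟨r, field, value⟩ := e
  unfold runB
  rw [foldl_max_eq, foldl_max_eq]
  have hps : (fun row => passStreakB row ((r, field, value) :: rest))
      = fun row => if rowPassesB row field value then passStreakB row rest + 1 else 0 := by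
    funext row; simp [passStreakB]
  by_cases hf : L.filter (fun row => rowPassesB row field value) = []
  · have hz : supOf (fun row => passStreakB row ((r, field, value) :: rest)) L = 0 := by
      rw [hps]
      apply sup_zero
      intro x hx
      have : ¬ rowPassesB x field value = true := by
        intro hpx
        exact (List.ne_nil_of_mem (List.mem_filter.mpr ⟨hx, hpx⟩)) hf
      simp [this]
    simp [hz, hf]
  · have hs : supOf (fun row => passStreakB row ((r, field, value) :: rest)) L
        = supOf (fun row => passStreakB row rest) (L.filter (fun row => rowPassesB row field value)) + 1 := by
      rw [hps]
      exact sup_shift _ _ _ hf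
    simp only [hs, hf, if_false, Nat.max_eq_right (Nat.zero_le _), List.length_cons]
    by_cases hb : supOf (fun row => passStreakB row rest) (L.filter (fun row => rowPassesB row field value)) = rest.length
    · simp [hb]
    · have h1 : ¬ (supOf (fun row => passStreakB row rest) (L.filter (fun row => rowPassesB row field value)) + 1 = rest.length + 1) := by omega
      simp [hb, List.getElem?_cons_succ]

theorem runB_nil (L : List (List (String × String))) : runB [] L = "" := by
  unfold runB
  rw [foldl_max_eq]
  have : supOf (fun row => passStreakB row []) L = 0 := sup_zero _ _ (fun x _ => rfl)
  simp [this]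

theorem rowGet_eq (row : List (String × String)) (k : String) :
    rowGetB row k = rowGetA row k := by
  unfold rowGetA rowGetB
  induction row with
  | nil => rfl
  | cons p rest ih =>
    obtain ⟨a, b⟩ := p
    by_cases h : a = k
    · subst h; simp [List.lookup, List.find?]
    · have h1 : (a == k) = false := beq_false_of_ne h
      have h2 : (k == a) = false := beq_false_of_ne (Ne.symm h)
      simp [List.lookup, List.find?, h1, h2, ih]

theorem matchesZone_eq (z c : String) : matchesZoneConstraintB z c = matchesZoneConstraintA z c := rfl

def activeFrom (query_row : List (String × String)) (specs : List (String × String × Option String)) :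
    List (String × Option String × String) :=
  specs.filterMap (fun s =>
    let v := rowGetB query_row s.1
    if v = "" then none else some (s.2.1, s.2.2, v))

theorem buildActive_eq (query_row : List (String × String)) :
    buildActiveB query_row = activeFrom query_row specsB := rfl

theorem step_freshness (query_row : List (String × String)) (remaining : List (List (String × String))) :
    seqA_freshness query_row remaining
      = runB (activeFrom query_row (specsB.drop 3)) remaining := by
  unfold seqA_freshness
  have hc : activeFrom query_row (specsB.drop 3)
      = (if rowGetB query_row "freshness_constraint" = "" then []
         else [("freshness_mismatch", some "freshness_class", rowGetB query_row "freshness_constraint")]) := by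
    by_cases h : rowGetB query_row "freshness_constraint" = "" <;>
      simp [activeFrom, specsB, List.filterMap, h]
  rw [hc]
  by_cases h : rowGetA query_row "freshness_constraint" = ""
  · have h' : rowGetB query_row "freshness_constraint" = "" := by rw [rowGet_eq]; exact h
    simp [h, h', runB_nil]
  · have h' : ¬ rowGetB query_row "freshness_constraint" = "" := by rw [rowGet_eq]; exact h
    simp only [h', if_false, h, ne_eq, not_false_eq_true, if_true]
    rw [runB_cons]
    have hfil : remaining.filter (fun row => rowPassesB row (some "freshness_class") (rowGetB query_row "freshness_constraint"))
        = remaining.filter (fun row => rowGetA row "freshness_class" == rowGetA query_row "freshness_constraint") := by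
      apply List.filter_congr
      intro row _
      simp [rowPassesB, rowGet_eq]
    rw [hfil]
    by_cases hemp : remaining.filter (fun row => rowGetA row "freshness_class" == rowGetA query_row "freshness_constraint") = [] <;>
      simp [hemp, runB_nil]

theorem step_service (query_row : List (String × String)) (remaining : List (List (String × String))) :
    seqA_service query_row remaining
      = runB (activeFrom query_row (specsB.drop 2)) remaining := by
  unfold seqA_service
  have hd : activeFrom query_row (specsB.drop 2)
      = (let v := rowGetB query_row "service_constraint";
         if v = "" then activeFrom query_row (specsB.drop 3)
         else ("service_mismatch", some "service_class", v) :: activeFrom query_row (specsB.drop 3)) := by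
    simp [activeFrom, specsB, List.filterMap]
    by_cases h : rowGetB query_row "service_constraint" = "" <;> simp [h]
  by_cases h : rowGetA query_row "service_constraint" = ""
  · rw [hd]; simp [rowGet_eq, h, step_freshness]
  · rw [hd]
    have h' : ¬ rowGetB query_row "service_constraint" = "" := by rw [rowGet_eq]; exact h
    simp only [h', if_false, h, ne_eq, not_false_eq_true, if_true]
    rw [runB_cons]
    have hfil : remaining.filter (fun row => rowPassesB row (some "service_class") (rowGetB query_row "service_constraint"))
        = remaining.filter (fun row => rowGetA row "service_class" == rowGetA query_row "service_constraint") := by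
      apply List.filter_congr
      intro row _
      simp [rowPassesB, rowGet_eq]
    rw [hfil]
    by_cases hemp : remaining.filter (fun row => rowGetA row "service_class" == rowGetA query_row "service_constraint") = [] <;>
      simp [hemp, step_freshness]

theorem step_zone_type (query_row : List (String × String)) (remaining : List (List (String × String))) :
    seqA_zone_type query_row remaining
      = runB (activeFrom query_row (specsB.drop 1)) remaining := by
  unfold seqA_zone_type
  have hd : activeFrom query_row (specsB.drop 1)
      = (let v := rowGetB query_row "zone_type_constraint";
         if v = "" then activeFrom query_row (specsB.drop 2)
         else ("zone_type_mismatch", some "zone_type", v) :: activeFrom query_row (specsB.drop 2)) := by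
    simp [activeFrom, specsB, List.filterMap]
    by_cases h : rowGetB query_row "zone_type_constraint" = "" <;> simp [h]
  by_cases h : rowGetA query_row "zone_type_constraint" = ""
  · rw [hd]; simp [rowGet_eq, h, step_service]
  · rw [hd]
    have h' : ¬ rowGetB query_row "zone_type_constraint" = "" := by rw [rowGet_eq]; exact h
    simp only [h', if_false, h, ne_eq, not_false_eq_true, if_true]
    rw [runB_cons]
    have hfil : remaining.filter (fun row => rowPassesB row (some "zone_type") (rowGetB query_row "zone_type_constraint"))
        = remaining.filter (fun row => rowGetA row "zone_type" == rowGetA query_row "zone_type_constraint") := by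
      apply List.filter_congr
      intro row _
      simp [rowPassesB, rowGet_eq]
    rw [hfil]
    by_cases hemp : remaining.filter (fun row => rowGetA row "zone_type" == rowGetA query_row "zone_type_constraint") = [] <;>
      simp [hemp, step_service]

theorem sequential_zero_reason_eq (candidate_rows : List (List (String × String))) (query_row : List (String × String)) :
    sequential_zero_reason_py candidate_rows query_row
      = sequential_zero_reason_py_alt candidate_rows query_row := by
  rw [alt_eq_runB, buildActive_eq]
  unfold sequential_zero_reason_py
  have hd : activeFrom query_row specsB
      = (let v := rowGetB query_row "zone_constraint";
         if v = "" then activeFrom query_row (specsB.drop 1)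
         else ("zone_mismatch", none, v) :: activeFrom query_row (specsB.drop 1)) := by
    simp [activeFrom, specsB, List.filterMap]
    by_cases h : rowGetB query_row "zone_constraint" = "" <;> simp [h]
  by_cases h : rowGetA query_row "zone_constraint" = ""
  · rw [hd]; simp [rowGet_eq, h, step_zone_type]
  · rw [hd]
    have h' : ¬ rowGetB query_row "zone_constraint" = "" := by rw [rowGet_eq]; exact h
    simp only [h', if_false, h, ne_eq, not_false_eq_true, if_true]
    rw [runB_cons]
    have hfil : candidate_rows.filter (fun row => rowPassesB row none (rowGetB query_row "zone_constraint"))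
        = candidate_rows.filter
            (fun row => matchesZoneConstraintA (rowGetA row "zone_id") (rowGetA query_row "zone_constraint")) := by
      apply List.filter_congr
      intro row _
      simp [rowPassesB, rowGet_eq, matchesZone_eq]
    rw [hfil]
    by_cases hemp : candidate_rows.filter
        (fun row => matchesZoneConstraintA (rowGetA row "zone_id") (rowGetA query_row "zone_constraint")) = [] <;>
      simp [hemp, step_zone_type]

-- ===== VERDICT =====
theorem sequential_zero_reason_py_spec : Claim_equal_sequential_zero_reason_py := by
  intro candidate_rows query_row _
  exact sequential_zero_reason_eq candidate_rows query_row
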